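-- pv_equiv track=rewrite | github.com/lcsilv3/omaum | scripts/import_utils.py | pick_field
-- ===== SOURCE A (Python) =====
-- import unicodedata
--
-- def normaliza(texto: str) -> str:
--     """Normaliza texto para comparação: remove acentos, decoda caracteres não-ASCII e lower."""
--     return (
--         unicodedata.normalize("NFKD", texto or "")
--         .encode("ASCII", "ignore")
--         .decode("ASCII")
--         .strip()
--         .lower()
--     )
--
-- def pick_field(row: dict, candidates: list[str]) -> str | None:
--     """Tenta extrair um campo de `row` testando vários nomes possíveis em `candidates`.
--
--     A comparação ignora acentos e case (usa `normaliza`). Retorna o valor encontrado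
--     ou None.
--     """
--     keys = list(row.keys())
--     norm_keys = {normaliza(k): k for k in keys}
--     for cand in candidates:
--         nk = normaliza(cand)
--         if nk in norm_keys:
--             return row.get(norm_keys[nk])
--     return None
-- ===== SOURCE B (Python) =====
-- import unicodedata
--
-- def normaliza(texto: str) -> str:
--     return (
--         unicodedata.normalize("NFKD", texto or "")
--         .encode("ASCII", "ignore")
--         .decode("ASCII")
--         .strip()
--         .lower()
--     )
--
-- def pick_field(row: dict, candidates: list[str]) -> str | None:
--     # Inverted strategy: index the CANDIDATES (normalized name -> first position),
--     # then make a single pass over the row's keys, keeping the key with the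
--     # smallest candidate index (on equal index the later key wins, matching the
--     # dict-comprehension "last key wins" rule of the original).
--     cand_idx = {}
--     for i, cand in enumerate(candidates):
--         cand_idx.setdefault(normaliza(cand), i)
--     best = None  # (candidate index, key)
--     for key in row:
--         ci = cand_idx.get(normaliza(key))
--         if ci is not None and (best is None or ci <= best[0]):
--             best = (ci, key)
--     return row.get(best[1]) if best is not None else None
-- ===== Notes on version B (the rewrite author's own statement) =====
-- stated objective: alternative
-- what changed: B inverts A's loop structure: instead of indexing the row's keys and looping over candidates, B indexes the candidates (normalized name -> first position) and makes a single min-scan over the row's keys, keeping the key with the smallest candidate index (later key wins ties).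
import Mathlib
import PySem

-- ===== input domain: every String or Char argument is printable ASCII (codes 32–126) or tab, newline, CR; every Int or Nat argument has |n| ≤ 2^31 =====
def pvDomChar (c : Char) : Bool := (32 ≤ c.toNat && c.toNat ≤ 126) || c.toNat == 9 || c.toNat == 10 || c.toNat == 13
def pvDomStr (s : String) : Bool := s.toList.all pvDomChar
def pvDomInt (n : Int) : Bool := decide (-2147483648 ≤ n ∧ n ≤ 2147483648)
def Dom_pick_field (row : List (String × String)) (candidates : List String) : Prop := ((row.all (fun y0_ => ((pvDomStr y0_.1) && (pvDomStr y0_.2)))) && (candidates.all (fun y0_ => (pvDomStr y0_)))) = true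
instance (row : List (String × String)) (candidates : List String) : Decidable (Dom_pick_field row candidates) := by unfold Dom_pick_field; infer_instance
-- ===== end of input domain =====

-- B inverts A's loop structure: it indexes the candidates (normalized -> first position) and
-- makes a single min-scan over the row's keys, instead of indexing the keys and looping over
-- candidates (alternative decomposition, same return value).


-- ===== PORT A =====
-- normaliza: NFKD + encode("ASCII","ignore") are the identity on the ASCII domain (Dom),
-- so on Dom the function is exactly strip().lower(); exact there.
def normaliza (texto : String) : String := PySem.Str.lower (PySem.Str.strip texto)

-- the 'for cand in candidates' loop of A
def pickFieldLoopA (rowD : PySem.Dict String String) (normKeys : PySem.Dict String String) : List String → Option String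
  | [] => none
  | cand :: rest =>
    let nk := normaliza cand
    match PySem.Dict.get? normKeys nk with      -- 'if nk in norm_keys: return row.get(norm_keys[nk])'
    | some k => PySem.Dict.get? rowD k
    | none => pickFieldLoopA rowD normKeys rest

def pick_field (row : List (String × String)) (candidates : List String) : Option String :=
  let rowD := PySem.Dict.ofList row
  let keys := rowD.keys
  let normKeys := keys.foldl (fun d k => d.insert (normaliza k) k) PySem.Dict.empty
  pickFieldLoopA rowD normKeys candidates

-- ===== PORT B =====
-- 'cand_idx.setdefault(normaliza(cand), i)' over enumerate(candidates)
def candIdxB (candidates : List String) : PySem.Dict String Int :=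
  (PySem.List.enumerate candidates).foldl (fun d p => d.setdefault (normaliza p.2) p.1) PySem.Dict.empty

-- 'for key in row: …' keeping best = (candidate index, key)
def bestB (candIdx : PySem.Dict String Int) (keys : List String) : Option (Int × String) :=
  keys.foldl (fun best key =>
    match PySem.Dict.get? candIdx (normaliza key) with
    | some ci =>
      match best with
      | none => some (ci, key)
      | some (j, _) => if ci ≤ j then some (ci, key) else best
    | none => best) none

def pick_field_alt (row : List (String × String)) (candidates : List String) : Option String :=
  let rowD := PySem.Dict.ofList row
  let candIdx := candIdxB candidates
  match bestB candIdx rowD.keys with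
  | some (_, key) => PySem.Dict.get? rowD key      -- 'return row.get(best[1])'
  | none => none

-- ===== PRECONDITION & SPEC =====
def Spec_pick_field (row : List (String × String)) (candidates : List String) (out : Option String) : Prop := out = pick_field_alt row candidates
instance (row : List (String × String)) (candidates : List String) (out : Option String) : Decidable (Spec_pick_field row candidates out) := by unfold Spec_pick_field; infer_instance

-- ===== CLAIM (what is proved, stated in full; the proofs are below) =====
def Claim_equal_pick_field : Prop := ∀ (row : List (String × String)) (candidates : List String), Dom_pick_field row candidates → Spec_pick_field row candidates (pick_field row candidates)

-- ===== LEMMAS AND PROOFS =====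

-- first index (from 0) of a candidate normalizing to nk
def firstIdx (nk : String) : List String → Option Int
  | [] => none
  | c :: cs => if normaliza c = nk then some 0 else (firstIdx nk cs).map (· + 1)

-- generic best-fold over keys driven by an index function g
def bestFold (g : String → Option Int) (keys : List String) (acc : Option (Int × String)) : Option (Int × String) :=
  keys.foldl (fun best key =>
    match g key with
    | some ci =>
      match best with
      | none => some (ci, key)
      | some (j, _) => if ci ≤ j then some (ci, key) else best
    | none => best) acc

theorem bestB_eq_bestFold (candIdx : PySem.Dict String Int) (keys : List String) :
    bestB candIdx keys = bestFold (fun k => PySem.Dict.get? candIdx (normaliza k)) keys none := rfl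

theorem bestFold_cons (g : String → Option Int) (k : String) (ks : List String) (acc : Option (Int × String)) :
    bestFold g (k :: ks) acc = bestFold g ks
      (match g k with
       | some ci => match acc with
         | none => some (ci, k)
         | some (j, _) => if ci ≤ j then some (ci, k) else acc
       | none => acc) := rfl

-- the candidate index dict computes firstIdx
theorem get?_candIdx_aux (nk : String) (cs : List String) :
    ∀ (s : Int) (d : PySem.Dict String Int),
    PySem.Dict.get? ((PySem.List.enumerate cs s).foldl (fun d p => d.setdefault (normaliza p.2) p.1) d) nk
      = ((PySem.Dict.get? d nk).or ((firstIdx nk cs).map (· + s))) := by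
  induction cs with
  | nil => intro s d; simp [PySem.List.enumerate_nil, firstIdx]
  | cons c cs ih =>
    intro s d
    rw [PySem.List.enumerate_cons]
    simp only [List.foldl_cons, ih]
    by_cases h : normaliza c = nk
    · subst h
      rw [PySem.Dict.get?_setdefault_self]
      cases hd : PySem.Dict.get? d (normaliza c) <;> simp [firstIdx]
    · rw [PySem.Dict.get?_setdefault_of_ne d s (Ne.symm h)]
      simp only [firstIdx, if_neg h]
      cases hd : PySem.Dict.get? d nk
      · cases hf : firstIdx nk cs <;> simp [Option.or]
        omega
      · simp [Option.or]

theorem get?_candIdx (candidates : List String) (nk : String) :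
    PySem.Dict.get? (candIdxB candidates) nk = firstIdx nk candidates := by
  unfold candIdxB
  rw [get?_candIdx_aux]
  cases hf : firstIdx nk candidates <;> simp [PySem.Dict.get?_empty, Option.or]

theorem firstIdx_nonneg (nk : String) (cs : List String) (i : Int) (h : firstIdx nk cs = some i) : 0 ≤ i := by
  induction cs generalizing i with
  | nil => simp [firstIdx] at h
  | cons c cs ih =>
    simp only [firstIdx] at h
    split at h
    · injection h with h; omega
    · cases hf : firstIdx nk cs <;> rw [hf] at h <;> simp at h
      have := ih _ hf; omega

-- the last key (in keys) normalizing to nk, as A's fold computes it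
def lastMatch (nk : String) (keys : List String) (acc : Option String) : Option String :=
  keys.foldl (fun acc k => if normaliza k = nk then some k else acc) acc

-- A's dict lookup into the fold-built index equals the last-match scan
theorem get?_foldl_insert_norm (keys : List String) (d : PySem.Dict String String) (nk : String) :
    PySem.Dict.get? (keys.foldl (fun d k => d.insert (normaliza k) k) d) nk
      = lastMatch nk keys (PySem.Dict.get? d nk) := by
  induction keys generalizing d with
  | nil => rfl
  | cons k ks ih =>
    simp only [List.foldl_cons, ih, lastMatch, PySem.Dict.get?_insert]
    by_cases h : normaliza k = nk
    · simp [h]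
    · rw [if_neg (fun h' => h h'.symm), if_neg h]

theorem lastMatch_no_match (nk : String) (keys : List String) (acc : Option String)
    (h : ∀ k ∈ keys, normaliza k ≠ nk) : lastMatch nk keys acc = acc := by
  induction keys generalizing acc with
  | nil => rfl
  | cons k ks ih =>
    simp only [lastMatch, List.foldl_cons] at *
    rw [if_neg (h k (by simp))]
    exact ih acc (fun k' hk' => h k' (by simp [hk']))

theorem lastMatch_indep (nk : String) (keys : List String) (hex : ∃ x ∈ keys, normaliza x = nk)
    (acc acc' : Option String) :
    lastMatch nk keys acc = lastMatch nk keys acc' := by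
  induction keys generalizing acc acc' with
  | nil => simp at hex
  | cons k ks ih =>
    simp only [lastMatch, List.foldl_cons]
    by_cases hks : ∃ x ∈ ks, normaliza x = nk
    · exact ih hks _ _
    · have hkm : normaliza k = nk := by
        obtain ⟨x, hx, hnx⟩ := hex
        rcases List.mem_cons.mp hx with rfl | hmem
        · exact hnx
        · exact absurd ⟨x, hmem, hnx⟩ hks
      rw [if_pos hkm, if_pos hkm]

-- if no key after acc matches with index ≤ 0, a (0, x) accumulator survives
theorem bestFold_keep_zero (g : String → Option Int) (ks : List String) (x : String)
    (h : ∀ k ∈ ks, ∀ i, g k = some i → ¬ i ≤ 0) :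
    bestFold g ks (some (0, x)) = some (0, x) := by
  induction ks with
  | nil => rfl
  | cons k ks ih =>
    rw [bestFold_cons]
    cases hg : g k with
    | none => exact ih (fun k' hk' => h k' (by simp [hk']))
    | some ci =>
      dsimp only
      rw [if_neg (h k (by simp) ci hg)]
      exact ih (fun k' hk' => h k' (by simp [hk']))

-- shifting every index by +1 shifts the result
theorem bestFold_shift (g g' : String → Option Int) (keys : List String)
    (h : ∀ k ∈ keys, g' k = (g k).map (· + 1)) (acc : Option (Int × String)) :
    bestFold g' keys (acc.map (fun p => (p.1 + 1, p.2))) = (bestFold g keys acc).map (fun p => (p.1 + 1, p.2)) := by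
  induction keys generalizing acc with
  | nil => rfl
  | cons k ks ih =>
    rw [bestFold_cons, bestFold_cons]
    have hk := h k (by simp)
    have hrest : ∀ k' ∈ ks, g' k' = (g k').map (· + 1) := fun k' hk' => h k' (by simp [hk'])
    cases hg : g k with
    | none => rw [hk, hg]; exact ih hrest acc
    | some ci =>
      rw [hk, hg]
      cases acc with
      | none => exact ih hrest (some (ci, k))
      | some p =>
        obtain ⟨j, y⟩ := p
        simp only [Option.map_some]
        by_cases hle : ci ≤ j
        · rw [if_pos hle, if_pos (by omega)]
          exact ih hrest (some (ci, k))
        · rw [if_neg hle, if_neg (by omega)]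
          exact ih hrest (some (j, y))

-- if the last key matching nc is k0 and matching keys get index 0, others positive, best is (0, k0)
set_option maxHeartbeats 1000000 in
theorem bestFold_zero (g : String → Option Int) (nc : String) (keys : List String) (k0 : String)
    (h0 : ∀ k ∈ keys, normaliza k = nc → g k = some 0)
    (hpos : ∀ k ∈ keys, normaliza k ≠ nc → ∀ i, g k = some i → 1 ≤ i)
    (hlm : lastMatch nc keys none = some k0) (acc : Option (Int × String))
    (hacc : ∀ j x, acc = some (j, x) → 0 ≤ j) :
    bestFold g keys acc = some (0, k0) := by
  induction keys generalizing acc with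
  | nil => simp [lastMatch] at hlm
  | cons k ks ih =>
    have h0' : ∀ k' ∈ ks, normaliza k' = nc → g k' = some 0 := fun k' hk' => h0 k' (by simp [hk'])
    have hpos' : ∀ k' ∈ ks, normaliza k' ≠ nc → ∀ i, g k' = some i → 1 ≤ i :=
      fun k' hk' => hpos k' (by simp [hk'])
    rw [bestFold_cons]
    by_cases hks : ∃ x ∈ ks, normaliza x = nc
    · obtain ⟨x, hx, hnx⟩ := hks
      have hlm' : lastMatch nc ks none = some k0 := by
        have h1 : lastMatch nc (k :: ks) none = lastMatch nc ks none := by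
          simp only [lastMatch, List.foldl_cons]
          exact lastMatch_indep nc ks ⟨x, hx, hnx⟩ _ _
        rw [← h1]; exact hlm
      apply ih h0' hpos' hlm'
      intro j x' hjx
      cases hg : g k with
      | none => rw [hg] at hjx; exact hacc j x' hjx
      | some ci =>
        have hci : 0 ≤ ci := by
          by_cases hm : normaliza k = nc
          · have := h0 k (by simp) hm; rw [hg] at this; injection this with h2; omega
          · have := hpos k (by simp) hm ci hg; omega
        rw [hg] at hjx
        dsimp only at hjx
        cases acc with
        | none => simp only [Option.some.injEq, Prod.mk.injEq] at hjx; obtain ⟨h1, h2⟩ := hjx; omega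
        | some p =>
          obtain ⟨j', y⟩ := p
          dsimp only at hjx
          by_cases hle : ci ≤ j'
          · rw [if_pos hle] at hjx; simp only [Option.some.injEq, Prod.mk.injEq] at hjx; obtain ⟨h1, h2⟩ := hjx; omega
          · rw [if_neg hle] at hjx; exact hacc j x' hjx
    · -- no match in ks: k must match, k0 = k, then (0, k) survives
      rw [not_exists] at hks
      simp only [not_and] at hks
      have hk : normaliza k = nc := by
        by_contra hkn
        have : lastMatch nc (k :: ks) none = none := by
          apply lastMatch_no_match
          intro k' hk'
          rcases List.mem_cons.mp hk' with rfl | hmem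
          · exact hkn
          · exact hks _ hmem
        rw [this] at hlm; simp at hlm
      have hk0 : k0 = k := by
        have : lastMatch nc (k :: ks) none = some k := by
          simp only [lastMatch, List.foldl_cons, if_pos hk]
          exact lastMatch_no_match nc ks (some k) hks
        rw [this] at hlm; injection hlm with h2; exact h2.symm
      rw [hk0]
      rw [h0 k (by simp) hk]
      have hkeep : ∀ k' ∈ ks, ∀ i, g k' = some i → ¬ i ≤ 0 := by
        intro k' hk' i hgi hle
        have := hpos' k' hk' (hks _ hk') i hgi
        omega
      cases acc with
      | none => exact bestFold_keep_zero g ks k hkeep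
      | some p =>
        obtain ⟨j, y⟩ := p
        dsimp only
        rw [if_pos (hacc j y rfl)]
        exact bestFold_keep_zero g ks k hkeep

-- if g is none on all keys the fold keeps the accumulator
theorem bestFold_none (g : String → Option Int) (keys : List String)
    (h : ∀ k ∈ keys, g k = none) (acc : Option (Int × String)) :
    bestFold g keys acc = acc := by
  induction keys generalizing acc with
  | nil => rfl
  | cons k ks ih =>
    rw [bestFold_cons, h k (by simp)]
    exact ih (fun k' hk' => h k' (by simp [hk'])) acc

-- core equivalence: A's candidate loop equals B's key scan, for any key list
-- lastMatch with a some-accumulator never returns none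
theorem lastMatch_some_ne_none (nk : String) (ks : List String) (x : String) :
    lastMatch nk ks (some x) ≠ none := by
  induction ks generalizing x with
  | nil => simp [lastMatch]
  | cons k ks ih =>
    simp only [lastMatch, List.foldl_cons]
    by_cases h : normaliza k = nk
    · rw [if_pos h]; exact ih k
    · rw [if_neg h]; exact ih x

-- a matching member forces lastMatch to be some
theorem lastMatch_ne_none_of_mem (nk : String) (keys : List String) (k : String)
    (hk : k ∈ keys) (hm : normaliza k = nk) (acc : Option String) :
    lastMatch nk keys acc ≠ none := by
  induction keys generalizing acc with
  | nil => simp at hk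
  | cons k' ks ih =>
    simp only [lastMatch, List.foldl_cons]
    rcases List.mem_cons.mp hk with rfl | hmem
    · rw [if_pos hm]; exact lastMatch_some_ne_none nk ks k
    · exact ih hmem _
    
theorem loopA_eq_scanB (rowD : PySem.Dict String String) (keys : List String) (cands : List String) :
    pickFieldLoopA rowD (keys.foldl (fun d k => d.insert (normaliza k) k) PySem.Dict.empty) cands
      = (match bestFold (fun k => firstIdx (normaliza k) cands) keys none with
         | some (_, key) => PySem.Dict.get? rowD key
         | none => none) := by
  induction cands with
  | nil =>
    rw [bestFold_none (fun k => firstIdx (normaliza k) []) keys (fun k _ => rfl) none]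
    rfl
  | cons c cs ih =>
    simp only [pickFieldLoopA, get?_foldl_insert_norm, PySem.Dict.get?_empty]
    cases hlm : lastMatch (normaliza c) keys none with
    | some k0 =>
      rw [bestFold_zero (fun k => firstIdx (normaliza k) (c :: cs)) (normaliza c) keys k0
        (fun k _ hm => by simp [firstIdx, hm])
        (fun k _ hm i hgi => by
          simp only [firstIdx] at hgi
          rw [if_neg (fun he => hm he.symm)] at hgi
          cases hf : firstIdx (normaliza k) cs with
          | none => rw [hf] at hgi; simp at hgi
          | some m =>
            rw [hf] at hgi
            simp only [Option.map_some, Option.some.injEq] at hgi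
            have := firstIdx_nonneg _ _ _ hf; omega)
        hlm none (fun j x h => absurd h (by simp))]
    | none =>
      rw [ih]
      have hpt : ∀ k ∈ keys, (fun k => firstIdx (normaliza k) (c :: cs)) k
          = ((fun k => firstIdx (normaliza k) cs) k).map (· + 1) := by
        intro k hk
        simp only [firstIdx]
        rw [if_neg (fun he => lastMatch_ne_none_of_mem (normaliza c) keys k hk he.symm none hlm)]
      have hsh := bestFold_shift (fun k => firstIdx (normaliza k) cs)
        (fun k => firstIdx (normaliza k) (c :: cs)) keys hpt none
      rw [show (Option.map (fun p => (p.1 + 1, p.2)) (none : Option (Int × String))) = none from rfl] at hsh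
      rw [hsh]
      cases bestFold (fun k => firstIdx (normaliza k) cs) keys none with
      | none => rfl
      | some p => obtain ⟨i, key⟩ := p; rfl

-- ===== VERDICT (by name: the statement is the Claim_ definition above) =====
theorem pick_field_spec : Claim_equal_pick_field := by
  intro row candidates _
  show pick_field row candidates = pick_field_alt row candidates
  unfold pick_field pick_field_alt
  dsimp only
  rw [bestB_eq_bestFold]
  have hfun : (fun k => PySem.Dict.get? (candIdxB candidates) (normaliza k))
      = (fun k => firstIdx (normaliza k) candidates) :=
    funext (fun k => get?_candIdx candidates (normaliza k))
  rw [hfun, ← loopA_eq_scanB (PySem.Dict.ofList row) (PySem.Dict.ofList row).keys candidates]
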